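-- pv_equiv track=rewrite | github.com/JammalAdeyemi/Ppython | Hackerrank/Visa_codesignal.py | solution
-- ===== SOURCE A (Python) =====
-- def solution(numbers, pattern):
--     count = 0
--     for i in range(len(numbers)-len(pattern)):
--         match = True
--         for j in range(len(pattern)):
--             if (pattern[j] == 1 and numbers[i+j] <= numbers[i+j+1]) or \
--                (pattern[j] == 0 and numbers[i+j] != numbers[i+j+1]) or \
--                (pattern[j] == -1 and numbers[i+j] >= numbers[i+j+1]):
--                 match = False
--                 break
--         if match:
--             count += 1
--     return count
-- ===== SOURCE B (Python) =====
-- def solution(numbers, pattern):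
--     """Count the windows whose adjacent comparisons match the pattern by
--     Shift-And string matching over the sequence of comparison signs: one bitmask
--     per sign says which pattern positions admit it; one pass keeps, in an integer
--     `state`, the set of pattern-prefix lengths currently matched."""
--     m = len(pattern)
--     if m == 0:
--         return len(numbers)  # an empty pattern matches at every element
--     def mask(c):
--         # bit l set iff pattern entry l admits comparison sign c
--         bits = 0
--         for l, p in enumerate(pattern):
--             if not ((p == 1 and c != 1) or (p == 0 and c != 0) or (p == -1 and c != -1)):
--                 bits |= 1 << l
--         return bits
--     masks = [mask(-1), mask(0), mask(1)]
--     full = 1 << (m - 1)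
--     state = 0
--     count = 0
--     for a, b in zip(numbers, numbers[1:]):
--         state = ((state << 1) | 1) & masks[(a > b) - (a < b) + 1]
--         if state & full:
--             count += 1
--     return count
-- ===== Notes on version B (the rewrite author's own statement) =====
-- stated objective: alternative
-- what changed: B replaces A's per-window rescan with Shift-And string matching over the sequence of adjacent comparison signs: one bitmask per sign records which pattern positions admit it, and a single pass updates an integer state holding all currently matched pattern-prefix lengths.
import Mathlib
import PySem

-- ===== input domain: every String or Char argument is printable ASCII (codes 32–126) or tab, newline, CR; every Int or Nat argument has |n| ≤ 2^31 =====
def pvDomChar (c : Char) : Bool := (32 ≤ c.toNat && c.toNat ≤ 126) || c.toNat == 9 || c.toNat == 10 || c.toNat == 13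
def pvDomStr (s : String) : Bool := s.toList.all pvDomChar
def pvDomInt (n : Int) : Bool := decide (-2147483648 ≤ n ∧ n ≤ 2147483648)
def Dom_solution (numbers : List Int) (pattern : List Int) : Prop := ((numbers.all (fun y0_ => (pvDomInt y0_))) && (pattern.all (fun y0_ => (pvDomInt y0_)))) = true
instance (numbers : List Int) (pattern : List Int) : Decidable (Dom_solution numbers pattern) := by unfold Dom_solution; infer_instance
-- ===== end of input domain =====

-- B replaces A's per-window rescan by one streaming pass over the adjacent-comparison
-- signs, maintaining the set of matched pattern-prefix lengths (objective: alternative).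

-- ===== PORT A =====
-- inner 'for j in range(len(pattern))' with its break; every index read here is in
-- range (j < len(pattern), i+j+1 < len(numbers)), so pyGetD is exact (Python never raises)
def solInner (numbers pattern : List Int) (i : Int) : List Int → Bool
  | [] => true
  | j :: js =>
      let pj := PySem.List.pyGetD pattern j 0
      let x := PySem.List.pyGetD numbers (i + j) 0
      let y := PySem.List.pyGetD numbers (i + j + 1) 0
      if (pj == 1 && decide (x ≤ y)) || (pj == 0 && !(x == y)) || (pj == -1 && decide (y ≤ x))
      then false
      else solInner numbers pattern i js

def solution (numbers : List Int) (pattern : List Int) : Int :=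
  (PySem.List.pyRange 0 ((numbers.length : Int) - (pattern.length : Int)) 1).foldl
    (fun count i =>
      if solInner numbers pattern i (PySem.List.pyRange 0 (pattern.length : Int) 1)
      then count + 1 else count) 0

-- ===== PORT B =====
-- 'not ((p == 1 and c != 1) or (p == 0 and c != 0) or (p == -1 and c != -1))', negated
def failb (p c : Int) : Bool :=
  (p == 1 && !(c == 1)) || (p == 0 && !(c == 0)) || (p == -1 && !(c == -1))

-- 'def mask(c)': bit l set iff pattern entry l admits sign c (the enumerate
-- index is the nonneg position, so .toNat is exact)
def maskB (pattern : List Int) (c : Int) : Nat :=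
  (PySem.List.enumerate pattern).foldl
    (fun bits lp => if failb lp.2 c then bits else bits ||| ((1 : Nat) <<< lp.1.toNat)) 0

-- one iteration of B's loop: comparison sign c, Shift-And step, count on the full bit
def altStep (masks : List Nat) (full : Nat) (st : Int × Nat) (ab : Int × Int) :
    Int × Nat :=
  let c : Int := (if ab.2 < ab.1 then 1 else 0) - (if ab.1 < ab.2 then 1 else 0)
  let state : Nat := ((st.2 <<< 1) ||| 1) &&& PySem.List.pyGetD masks (c + 1) 0
  (if state &&& full ≠ 0 then st.1 + 1 else st.1, state)

def solution_alt (numbers : List Int) (pattern : List Int) : Int :=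
  if pattern.length = 0 then (numbers.length : Int)
  else ((numbers.zip (PySem.List.slice numbers (some 1) none)).foldl
          (altStep [maskB pattern (-1), maskB pattern 0, maskB pattern 1]
                   ((1 : Nat) <<< (pattern.length - 1)))
          ((0 : Int), (0 : Nat))).1

-- ===== PRECONDITION & SPEC =====
def Spec_solution (numbers : List Int) (pattern : List Int) (out : Int) : Prop := out = solution_alt numbers pattern
instance (numbers : List Int) (pattern : List Int) (out : Int) : Decidable (Spec_solution numbers pattern out) := by unfold Spec_solution; infer_instance

-- ===== CLAIM (what is proved, stated in full; the proofs are below) =====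
def Claim_equal_solution : Prop := ∀ (numbers : List Int) (pattern : List Int), Dom_solution numbers pattern → Spec_solution numbers pattern (solution numbers pattern)

-- ===== LEMMAS AND PROOFS =====

-- "pattern entry p admits comparison sign c"
def okp (p c : Int) : Bool := !failb p c

-- the comparison sign of an adjacent pair (what B's loop computes as c)
def sig (a b : Int) : Int := (if b < a then 1 else 0) - (if a < b then 1 else 0)

-- the sign sequence of a list
def sigs (numbers : List Int) : List Int :=
  (numbers.zip numbers.tail).map (fun ab => sig ab.1 ab.2)

-- window match predicate shared by both characterisations
def ma (numbers pattern : List Int) (i : Nat) : Bool :=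
  (List.range pattern.length).all
    (fun j => okp (pattern.getD j 0) ((sigs numbers).getD (i + j) 0))

-- "a partial match of length j ends after the first d signs of T"
def mend (T pattern : List Int) (d j : Nat) : Bool :=
  decide (1 ≤ j) && decide (j ≤ pattern.length) && decide (j ≤ d) &&
  (List.range j).all (fun r => okp (pattern.getD (j - 1 - r) 0) (T.getD (d - 1 - r) 0))

theorem mend_iff (T pattern : List Int) (d j : Nat) :
    mend T pattern d j = true ↔
      1 ≤ j ∧ j ≤ pattern.length ∧ j ≤ d ∧
        ∀ r < j, okp (pattern.getD (j - 1 - r) 0) (T.getD (d - 1 - r) 0) = true := by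
  simp [mend, List.all_eq_true, and_assoc]

theorem cond_eq_not_okp (p x y : Int) :
    ((p == 1 && decide (x ≤ y)) || (p == 0 && !(x == y)) || (p == -1 && decide (y ≤ x)))
      = ! okp p (sig x y) := by
  rcases lt_trichotomy x y with h | h | h
  · have e : sig x y = -1 := by simp [sig, h, show ¬ y < x from by omega]
    rw [Bool.eq_iff_iff, e]
    simp [okp, failb]
    try omega
  · subst h
    have e : sig x x = 0 := by simp [sig]
    rw [Bool.eq_iff_iff, e]
    simp [okp, failb]
    try omega
  · have e : sig x y = 1 := by simp [sig, h, show ¬ x < y from by omega]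
    rw [Bool.eq_iff_iff, e]
    simp [okp, failb]
    try omega

theorem solInner_all (numbers pattern : List Int) (i : Int) (js : List Int) :
    solInner numbers pattern i js =
      js.all (fun j => okp (PySem.List.pyGetD pattern j 0)
        (sig (PySem.List.pyGetD numbers (i + j) 0) (PySem.List.pyGetD numbers (i + j + 1) 0))) := by
  induction js with
  | nil => rfl
  | cons j js ih =>
      simp only [solInner, List.all_cons, cond_eq_not_okp]
      cases hok : okp (PySem.List.pyGetD pattern j 0)
        (sig (PySem.List.pyGetD numbers (i + j) 0) (PySem.List.pyGetD numbers (i + j + 1) 0)) <;>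
        simp [ih]

theorem A_foldl (numbers pattern : List Int) (l : List Int) (c : Int) :
    l.foldl (fun count i =>
        if solInner numbers pattern i (PySem.List.pyRange 0 (pattern.length : Int) 1)
        then count + 1 else count) c
      = c + l.countP
          (fun i => solInner numbers pattern i (PySem.List.pyRange 0 (pattern.length : Int) 1)) := by
  induction l generalizing c with
  | nil => simp
  | cons x xs ih =>
      by_cases h : solInner numbers pattern x (PySem.List.pyRange 0 (pattern.length : Int) 1) = true <;>
        simp [List.countP_cons, h, ih] <;> try omega

theorem sigs_length (numbers : List Int) : (sigs numbers).length = numbers.length - 1 := by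
  simp [sigs, List.length_zip] <;> try omega

theorem sigs_getD (numbers : List Int) (k : Nat) (hk : k + 1 < numbers.length) :
    (sigs numbers).getD k 0 = sig (numbers.getD k 0) (numbers.getD (k + 1) 0) := by
  have hk' : k < (numbers.zip numbers.tail).length := by
    simp [List.length_zip]; omega
  have h1 : k < numbers.length := by omega
  rw [sigs, List.getD_eq_getElem _ _ (by simpa using hk'), List.getElem_map,
    List.getElem_zip, List.getD_eq_getElem _ _ h1, List.getD_eq_getElem _ _ hk,
    List.getElem_tail]

theorem inner_eq (numbers pattern : List Int) (i : Nat)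
    (hi : i < numbers.length - pattern.length) :
    solInner numbers pattern (0 + (i : Int)) (PySem.List.pyRange 0 (pattern.length : Int) 1)
      = ma numbers pattern i := by
  rw [solInner_all, PySem.List.pyRange_one, List.all_map]
  have h0 : ((pattern.length : Int) - 0).toNat = pattern.length := by omega
  rw [h0, ma, Bool.eq_iff_iff, List.all_eq_true, List.all_eq_true]
  have hpt : ∀ j ∈ List.range pattern.length,
      (okp (PySem.List.pyGetD pattern ((0 : Int) + (j : Int)) 0)
        (sig (PySem.List.pyGetD numbers ((0 + (i : Int)) + (0 + (j : Int))) 0)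
             (PySem.List.pyGetD numbers ((0 + (i : Int)) + (0 + (j : Int)) + 1) 0)))
        = okp (pattern.getD j 0) ((sigs numbers).getD (i + j) 0) := by
    intro j hj
    have hj' := List.mem_range.mp hj
    have e2 : (0 + (i : Int)) + (0 + (j : Int)) + 1 = ((i + j + 1 : Nat) : Int) := by
      push_cast; ring
    have e1 : (0 + (i : Int)) + (0 + (j : Int)) = ((i + j : Nat) : Int) := by
      push_cast; ring
    have e0 : (0 : Int) + (j : Int) = ((j : Nat) : Int) := by push_cast; ring
    rw [e2, e1, e0]
    simp only [PySem.List.pyGetD_natCast]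
    rw [sigs_getD numbers (i + j) (by omega)]
  constructor
  · intro h j hj
    rw [← hpt j hj]
    exact h j hj
  · intro h j hj
    simp only [Function.comp_apply]
    rw [hpt j hj]
    exact h j hj

-- characterisation of A: it counts the matching windows
theorem A_char (numbers pattern : List Int) :
    solution numbers pattern =
      ((List.range (numbers.length - pattern.length)).countP (ma numbers pattern) : Int) := by
  unfold solution
  rw [A_foldl, PySem.List.pyRange_one 0 ((numbers.length : Int) - (pattern.length : Int)),
    List.countP_map]
  have e : (((numbers.length : Int) - (pattern.length : Int)) - 0).toNat
      = numbers.length - pattern.length := by omega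
  rw [e]
  have hcg : ∀ i ∈ List.range (numbers.length - pattern.length),
      (((fun i => solInner numbers pattern i (PySem.List.pyRange 0 (pattern.length : Int) 1)) ∘
          (fun k : Nat => (0 : Int) + (k : Int))) i = true ↔ ma numbers pattern i = true) := by
    intro i hi
    simp only [Function.comp_apply]
    rw [inner_eq numbers pattern i (List.mem_range.mp hi)]
  rw [List.countP_congr hcg]
  simp

-- bit t of 1 <<< k
theorem shl_one_testBit (k t : Nat) : ((1 : Nat) <<< k).testBit t = decide (k = t) := by
  rw [Nat.one_shiftLeft]
  by_cases h : k = t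
  · subst h; simp [Nat.testBit_two_pow_self]
  · rw [Nat.testBit_two_pow_of_ne h]
    simp [h]

-- bits of the mask-building fold
theorem maskFold_testBit (c : Int) (ps : List Int) : ∀ (s : Int), 0 ≤ s → ∀ (acc : Nat) (t : Nat),
    ((PySem.List.enumerate ps s).foldl
        (fun bits lp => if failb lp.2 c then bits else bits ||| ((1 : Nat) <<< lp.1.toNat)) acc).testBit t
      = (acc.testBit t ||
         (decide (s.toNat ≤ t) && decide (t < s.toNat + ps.length) && okp (ps.getD (t - s.toNat) 0) c)) := by
  induction ps with
  | nil =>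
      intro s hs acc t
      simp only [PySem.List.enumerate_nil, List.foldl_nil, List.length_nil, Nat.add_zero]
      by_cases h1 : s.toNat ≤ t
      · have h2 : ¬ (t < s.toNat) := by omega
        simp [h1, h2]
      · simp [h1]
  | cons p ps ih =>
      intro s hs acc t
      rw [PySem.List.enumerate_cons, List.foldl_cons, ih (s + 1) (by omega)]
      have hst : (s + 1).toNat = s.toNat + 1 := by omega
      rw [hst]
      have hlen : (p :: ps).length = ps.length + 1 := by simp
      have hacc : ∀ b : Bool,
          ((if failb p c then acc else acc ||| ((1 : Nat) <<< s.toNat)).testBit t)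
            = (acc.testBit t || (!failb p c && decide (s.toNat = t))) := by
        intro _
        by_cases hf : failb p c = true
        · simp [hf]
        · simp only [if_neg hf, Nat.testBit_or, shl_one_testBit]
          simp [hf]
      rw [hacc true, hlen, Bool.eq_iff_iff]
      simp only [Bool.or_eq_true, Bool.and_eq_true, Bool.not_eq_true', decide_eq_true_eq]
      rcases Nat.lt_trichotomy t s.toNat with h | h | h
      · constructor
        · rintro ((ha | ⟨-, he⟩) | ⟨⟨h2, -⟩, -⟩)
          · exact Or.inl ha
          · omega
          · omega
        · rintro (ha | ⟨⟨h1, -⟩, -⟩)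
          · exact Or.inl (Or.inl ha)
          · omega
      · have he0 : t - s.toNat = 0 := by omega
        have hgp : (p :: ps).getD (t - s.toNat) 0 = p := by rw [he0]; rfl
        constructor
        · rintro ((ha | ⟨hf, -⟩) | ⟨⟨h2, -⟩, -⟩)
          · exact Or.inl ha
          · refine Or.inr ⟨⟨by omega, by omega⟩, ?_⟩
            rw [hgp]
            simp [okp, hf]
          · omega
        · rintro (ha | ⟨⟨-, -⟩, hk⟩)
          · exact Or.inl (Or.inl ha)
          · refine Or.inl (Or.inr ⟨?_, by omega⟩)
            rw [hgp] at hk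
            simpa [okp] using hk
      · have he : t - s.toNat = (t - (s.toNat + 1)) + 1 := by omega
        have hgp : (p :: ps).getD (t - s.toNat) 0 = ps.getD (t - (s.toNat + 1)) 0 := by
          rw [he]; simp
        constructor
        · rintro ((ha | ⟨-, he2⟩) | ⟨⟨-, h3⟩, hk⟩)
          · exact Or.inl ha
          · omega
          · exact Or.inr ⟨⟨by omega, by omega⟩, by rw [hgp]; exact hk⟩
        · rintro (ha | ⟨⟨-, h3⟩, hk⟩)
          · exact Or.inl (Or.inl ha)
          · rw [hgp] at hk
            exact Or.inr ⟨⟨by omega, by omega⟩, hk⟩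

-- bits of a mask: position t admits sign c
theorem maskB_testBit (pattern : List Int) (c : Int) (t : Nat) :
    (maskB pattern c).testBit t
      = (decide (t < pattern.length) && okp (pattern.getD t 0) c) := by
  unfold maskB
  rw [maskFold_testBit c pattern 0 le_rfl 0 t]
  simp [Nat.zero_testBit]

-- unfolding one automaton step of the match-end predicate
theorem mend_succ (T pattern : List Int) (d t : Nat) :
    mend T pattern (d + 1) (t + 1)
      = (decide (t + 1 ≤ pattern.length) && okp (pattern.getD t 0) (T.getD d 0)
          && (decide (t = 0) || mend T pattern d t)) := by
  rw [Bool.eq_iff_iff]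
  simp only [Bool.and_eq_true, Bool.or_eq_true, decide_eq_true_eq]
  rw [mend_iff, mend_iff]
  constructor
  · rintro ⟨-, h2, h3, hcl⟩
    have h0 := hcl 0 (by omega)
    simp only [Nat.add_sub_cancel, Nat.sub_zero] at h0
    refine ⟨⟨h2, ?_⟩, ?_⟩
    · simpa using h0
    · by_cases ht : t = 0
      · exact Or.inl ht
      · refine Or.inr ⟨by omega, by omega, by omega, ?_⟩
        intro r hr
        have hc := hcl (r + 1) (by omega)
        have e1 : t + 1 - 1 - (r + 1) = t - 1 - r := by omega
        have e2 : d + 1 - 1 - (r + 1) = d - 1 - r := by omega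
        rw [e1, e2] at hc
        exact hc
  · rintro ⟨⟨h2, hok⟩, ht | hmd⟩
    · subst ht
      refine ⟨by omega, by omega, by omega, ?_⟩
      intro r hr
      have hr0 : r = 0 := by omega
      subst hr0
      simpa using hok
    · obtain ⟨h1', h2', h3', hcl'⟩ := hmd
      refine ⟨by omega, by omega, by omega, ?_⟩
      intro r hr
      match r with
      | 0 => simpa using hok
      | r' + 1 =>
          have hc := hcl' r' (by omega)
          have e1 : t + 1 - 1 - (r' + 1) = t - 1 - r' := by omega
          have e2 : d + 1 - 1 - (r' + 1) = d - 1 - r' := by omega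
          rw [e1, e2]
          exact hc

-- one Shift-And step preserves the state invariant
theorem step_testBit (pattern T : List Int) (d : Nat) (s : Nat)
    (hinv : ∀ u, s.testBit u = (decide (u < pattern.length) && mend T pattern d (u + 1)))
    (t : Nat) :
    (((s <<< 1) ||| 1) &&& maskB pattern (T.getD d 0)).testBit t
      = (decide (t < pattern.length) && mend T pattern (d + 1) (t + 1)) := by
  rw [Nat.testBit_and, Nat.testBit_or, Nat.testBit_shiftLeft, maskB_testBit, mend_succ]
  match t with
  | 0 =>
      rw [Bool.eq_iff_iff]
      simp only [Bool.and_eq_true, Bool.or_eq_true, decide_eq_true_eq]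
      constructor
      · rintro ⟨-, h1, hok⟩
        exact ⟨h1, ⟨by omega, hok⟩, Or.inl trivial⟩
      · rintro ⟨h1, ⟨-, hok⟩, -⟩
        refine ⟨Or.inr ?_, h1, hok⟩
        simp
  | t + 1 =>
      have h1 : Nat.testBit 1 (t + 1) = false := by
        rw [← Bool.not_eq_true, Nat.testBit_one_eq_true_iff_self_eq_zero]
        omega
      have e : t + 1 - 1 = t := by omega
      rw [h1, e, hinv t, Bool.eq_iff_iff]
      simp only [Bool.and_eq_true, Bool.or_eq_true, decide_eq_true_eq]
      constructor
      · rintro ⟨⟨-, ⟨ht, hmd⟩⟩ | hf, htl, hok⟩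
        · exact ⟨htl, ⟨by omega, hok⟩, Or.inr hmd⟩
        · exact absurd hf (by simp)
      · rintro ⟨htl, ⟨-, hok⟩, ht0 | hmd⟩
        · omega
        · exact ⟨Or.inl ⟨by omega, by omega, hmd⟩, htl, hok⟩

-- Python truthiness of 'state & full' with full = 1 << k
theorem and_shl_ne (s k : Nat) : (s &&& ((1 : Nat) <<< k) ≠ 0) ↔ s.testBit k = true := by
  rw [Nat.one_shiftLeft, Nat.and_two_pow]
  cases h : s.testBit k <;> simp [h]

-- B's loop body with the sign already computed
def stepN (pattern : List Int) (st : Int × Nat) (c : Int) : Int × Nat :=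
  ((if (((st.2 <<< 1) ||| 1) &&& maskB pattern c) &&& ((1 : Nat) <<< (pattern.length - 1)) ≠ 0
    then st.1 + 1 else st.1),
   ((st.2 <<< 1) ||| 1) &&& maskB pattern c)

-- the mask list indexed by sign + 1 yields the mask of the sign
theorem masksGet (pattern : List Int) (a b : Int) :
    PySem.List.pyGetD [maskB pattern (-1), maskB pattern 0, maskB pattern 1] (sig a b + 1) 0
      = maskB pattern (sig a b) := by
  rcases lt_trichotomy a b with h | h | h
  · have e : sig a b = -1 := by simp [sig, h, show ¬ b < a from by omega]
    rw [e, show (-1 : Int) + 1 = ((0 : Nat) : Int) from by norm_num, PySem.List.pyGetD_natCast]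
    rfl
  · subst h
    have e : sig a a = 0 := by simp [sig]
    rw [e, show (0 : Int) + 1 = ((1 : Nat) : Int) from by norm_num, PySem.List.pyGetD_natCast]
    rfl
  · have e : sig a b = 1 := by simp [sig, h, show ¬ a < b from by omega]
    rw [e, show (1 : Int) + 1 = ((2 : Nat) : Int) from by norm_num, PySem.List.pyGetD_natCast]
    rfl

-- altStep over a pair is stepN over its sign
theorem altStep_eq (pattern : List Int) :
    altStep [maskB pattern (-1), maskB pattern 0, maskB pattern 1]
        ((1 : Nat) <<< (pattern.length - 1))
      = fun st ab => stepN pattern st (sig ab.1 ab.2) := by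
  funext st ab
  simp only [altStep, stepN]
  rw [show ((if ab.2 < ab.1 then (1 : Int) else 0) - (if ab.1 < ab.2 then 1 else 0)) = sig ab.1 ab.2 from rfl,
    masksGet pattern ab.1 ab.2]

-- the streaming loop counts exactly the full matches ending in the unprocessed suffix
theorem loopB (pattern T : List Int) (hm : pattern.length ≠ 0) :
    ∀ (l : List Int) (d : Nat), T.drop d = l → ∀ (count : Int) (s : Nat),
      (∀ u, s.testBit u = (decide (u < pattern.length) && mend T pattern d (u + 1))) →
      (l.foldl (stepN pattern) (count, s)).1
        = count + ((List.range (T.length - d)).countP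
            (fun q => mend T pattern (d + q + 1) pattern.length) : Nat) := by
  intro l
  induction l with
  | nil =>
      intro d hd count s hinv
      have hle : T.length ≤ d := List.drop_eq_nil_iff.mp hd
      simp [Nat.sub_eq_zero_of_le hle]
  | cons c l' ih =>
      intro d hd count s hinv
      have hlen : d < T.length := by
        have hl := congrArg List.length hd
        simp [List.length_drop] at hl; omega
      have hc : T.getD d 0 = c := by
        have h1 : T[d]? = some c := by rw [← List.head?_drop, hd]; rfl
        rw [List.getD_eq_getElem?_getD, h1]; rfl
      have hdrop : T.drop (d + 1) = l' := by
        have h2 : List.drop 1 (List.drop d T) = List.drop (d + 1) T := by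
          rw [List.drop_drop]
        rw [hd] at h2; simpa using h2.symm
      have hinv' : ∀ u, (((s <<< 1) ||| 1) &&& maskB pattern c).testBit u
          = (decide (u < pattern.length) && mend T pattern (d + 1) (u + 1)) := by
        intro u; rw [← hc]; exact step_testBit pattern T d s hinv u
      simp only [List.foldl_cons]
      have hstep : stepN pattern (count, s) c =
          ((if (((s <<< 1) ||| 1) &&& maskB pattern c) &&& ((1 : Nat) <<< (pattern.length - 1)) ≠ 0
            then count + 1 else count),
           ((s <<< 1) ||| 1) &&& maskB pattern c) := rfl
      rw [hstep, ih (d + 1) hdrop _ _ hinv']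
      have hT : T.length - d = (T.length - (d + 1)) + 1 := by omega
      rw [hT, List.range_succ_eq_map, List.countP_cons, List.countP_map]
      have hcg : (List.range (T.length - (d + 1))).countP
            ((fun q => mend T pattern (d + q + 1) pattern.length) ∘ Nat.succ)
          = (List.range (T.length - (d + 1))).countP
            (fun q => mend T pattern (d + 1 + q + 1) pattern.length) := by
        apply List.countP_congr
        intro q _
        have e : d + (q + 1) + 1 = d + 1 + q + 1 := by omega
        simp only [Function.comp_apply, Nat.succ_eq_add_one, e]
      rw [hcg]
      have hfullbit : ((((s <<< 1) ||| 1) &&& maskB pattern c) &&&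
            ((1 : Nat) <<< (pattern.length - 1)) ≠ 0)
          ↔ mend T pattern (d + 1) pattern.length = true := by
        rw [and_shl_ne, hinv' (pattern.length - 1)]
        have e1 : pattern.length - 1 + 1 = pattern.length := by omega
        have e2 : decide (pattern.length - 1 < pattern.length) = true := by simp; omega
        rw [e1, e2, Bool.true_and]
      by_cases hM : mend T pattern (d + 0 + 1) pattern.length = true
      · rw [if_pos (hfullbit.mpr (by simpa using hM)), if_pos hM]
        push_cast; ring
      · rw [if_neg (fun hmem => hM (by simpa using hfullbit.mp hmem)), if_neg hM]
        push_cast; ring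

-- characterisation of B: it counts the positions where a full match ends
theorem B_char (numbers pattern : List Int) (hm : pattern.length ≠ 0) :
    solution_alt numbers pattern
      = ((List.range ((sigs numbers).length)).countP
          (fun q => mend (sigs numbers) pattern (q + 1) pattern.length) : Int) := by
  unfold solution_alt
  rw [if_neg hm, PySem.List.slice_from_one, altStep_eq]
  have hfold : (numbers.zip numbers.tail).foldl
        (fun st ab => stepN pattern st (sig ab.1 ab.2)) ((0 : Int), (0 : Nat))
      = (sigs numbers).foldl (stepN pattern) ((0 : Int), (0 : Nat)) := by
    rw [sigs, List.foldl_map]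
  rw [hfold]
  have hini : ∀ u : Nat, (0 : Nat).testBit u
      = (decide (u < pattern.length) && mend (sigs numbers) pattern 0 (u + 1)) := by
    intro u
    rw [Nat.zero_testBit, Bool.eq_iff_iff]
    simp only [Bool.false_eq_true, false_iff, Bool.and_eq_true]
    rintro ⟨-, hmd⟩
    rw [mend_iff] at hmd
    omega
  have h := loopB pattern (sigs numbers) hm (sigs numbers) 0 rfl 0 0 hini
  rw [h]
  simp

-- the two counts agree: a match ends at sign q iff window q+1-m matches
theorem counts_eq (numbers pattern : List Int) (hm : pattern.length ≠ 0) :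
    (List.range ((sigs numbers).length)).countP
        (fun q => mend (sigs numbers) pattern (q + 1) pattern.length)
      = (List.range (numbers.length - pattern.length)).countP (ma numbers pattern) := by
  have hT : (sigs numbers).length = numbers.length - 1 := sigs_length numbers
  by_cases hnm : numbers.length < pattern.length
  · have h1 : numbers.length - pattern.length = 0 := by omega
    have hz : ∀ q ∈ List.range ((sigs numbers).length),
        ¬ ((fun q => mend (sigs numbers) pattern (q + 1) pattern.length) q = true) := by
      intro q hq
      have hq' := List.mem_range.mp hq
      rw [mend_iff]
      rintro ⟨-, h2, h3, -⟩
      omega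
    rw [List.countP_eq_zero.mpr hz, h1]
    simp
  · have hsplit : numbers.length - 1 = (pattern.length - 1) + (numbers.length - pattern.length) := by
      omega
    rw [hT, hsplit, List.range_add, List.countP_append, List.countP_map]
    have hz : (List.range (pattern.length - 1)).countP
        (fun q => mend (sigs numbers) pattern (q + 1) pattern.length) = 0 := by
      rw [List.countP_eq_zero]
      intro q hq
      have hq' := List.mem_range.mp hq
      rw [mend_iff]
      rintro ⟨-, h2, h3, -⟩
      omega
    rw [hz]
    have hcg : ∀ i ∈ List.range (numbers.length - pattern.length),
        (((fun q => mend (sigs numbers) pattern (q + 1) pattern.length) ∘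
            (fun x => (pattern.length - 1) + x)) i = true ↔ ma numbers pattern i = true) := by
      intro i hi
      have hi' := List.mem_range.mp hi
      simp only [Function.comp_apply]
      rw [mend_iff, ma, List.all_eq_true]
      constructor
      · rintro ⟨h1, h2, h3, hcl⟩ j hj
        have hj' := List.mem_range.mp hj
        have hc := hcl (pattern.length - 1 - j) (by omega)
        have e1 : pattern.length - 1 - (pattern.length - 1 - j) = j := by omega
        have e2 : (pattern.length - 1) + i + 1 - 1 - (pattern.length - 1 - j) = i + j := by omega
        rw [e1, e2] at hc; exact hc
      · intro h
        refine ⟨by omega, by omega, by omega, ?_⟩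
        intro r hr
        have hc := h (pattern.length - 1 - r) (List.mem_range.mpr (by omega))
        have e2 : (pattern.length - 1) + i + 1 - 1 - r = i + (pattern.length - 1 - r) := by
          omega
        rw [e2]; exact hc
    rw [List.countP_congr hcg]
    simp

-- ===== VERDICT (by name: the statement is the Claim_ definition above) =====
theorem solution_spec : Claim_equal_solution := by
  intro numbers pattern _
  unfold Spec_solution
  by_cases hm : pattern.length = 0
  · have hA : solution numbers pattern = (numbers.length : Int) := by
      rw [A_char]
      have hall : ∀ i ∈ List.range (numbers.length - pattern.length),
          ma numbers pattern i = true := by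
        intro i _; simp [ma, hm]
      rw [List.countP_eq_length.mpr hall]
      simp [hm]
    rw [hA]
    unfold solution_alt
    rw [if_pos hm]
  · rw [A_char, B_char numbers pattern hm, counts_eq numbers pattern hm]
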